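-- pv_equiv track=rewrite | github.com/CodingThrust/problem-reductions | docs/paper/verify-reductions/verify_set_splitting_betweenness.py | normalize_subsets
-- ===== SOURCE A (Python) =====
-- def normalize_subsets(universe_size, subsets):
--     """Stage 1: Decompose subsets of size > 3 into size 2 or 3.
--
--     For each subset of size k > 3, introduce auxiliary pairs (y+, y-)
--     with complementarity subsets, and split:
--       NAE(s1, s2, ..., sk) ->
--         NAE(s1, s2, y+) AND complementarity(y+, y-) AND NAE(y-, s3, ..., sk)
--     Recurse on the second NAE if size > 3.
--
--     Returns:
--         (new_universe_size, new_subsets)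
--     """
--     new_universe_size = universe_size
--     new_subsets = []
--
--     for subset in subsets:
--         if len(subset) <= 3:
--             new_subsets.append(list(subset))
--         else:
--             # Decompose iteratively
--             remaining = list(subset)
--             while len(remaining) > 3:
--                 y_plus = new_universe_size
--                 y_minus = new_universe_size + 1
--                 new_universe_size += 2
--
--                 # NAE(remaining[0], remaining[1], y_plus)
--                 new_subsets.append([remaining[0], remaining[1], y_plus])
--                 # Complementarity: {y_plus, y_minus}
--                 new_subsets.append([y_plus, y_minus])
--                 # Continue with NAE(y_minus, remaining[2], ..., remaining[-1])
--                 remaining = [y_minus] + remaining[2:]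
--
--             new_subsets.append(remaining)  # size 2 or 3
--
--     return new_universe_size, new_subsets
-- ===== SOURCE B (Python) =====
-- def normalize_subsets(universe_size, subsets):
--     """One pass per subset: carry the previous endpoint (y_minus) instead of
--     rebuilding the remaining list each round."""
--     u = universe_size
--     out = []
--     for subset in subsets:
--         if len(subset) <= 3:
--             out.append(list(subset))
--         else:
--             prev = subset[0]
--             for x in subset[1:-2]:
--                 out.append([prev, x, u])
--                 out.append([u, u + 1])
--                 prev = u + 1
--                 u += 2
--             out.append([prev] + subset[-2:])
--     return u, out
-- ===== Notes on version B (the rewrite author's own statement) =====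
-- stated objective: faster
-- what changed: Instead of rebuilding the remaining list ([y_minus] + remaining[2:]) each round of a while-loop, B makes one pass over subset[1:-2] carrying the previous endpoint (y_minus) in a variable, so each subset of size k is split in O(k) instead of O(k^2).
import Mathlib
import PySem

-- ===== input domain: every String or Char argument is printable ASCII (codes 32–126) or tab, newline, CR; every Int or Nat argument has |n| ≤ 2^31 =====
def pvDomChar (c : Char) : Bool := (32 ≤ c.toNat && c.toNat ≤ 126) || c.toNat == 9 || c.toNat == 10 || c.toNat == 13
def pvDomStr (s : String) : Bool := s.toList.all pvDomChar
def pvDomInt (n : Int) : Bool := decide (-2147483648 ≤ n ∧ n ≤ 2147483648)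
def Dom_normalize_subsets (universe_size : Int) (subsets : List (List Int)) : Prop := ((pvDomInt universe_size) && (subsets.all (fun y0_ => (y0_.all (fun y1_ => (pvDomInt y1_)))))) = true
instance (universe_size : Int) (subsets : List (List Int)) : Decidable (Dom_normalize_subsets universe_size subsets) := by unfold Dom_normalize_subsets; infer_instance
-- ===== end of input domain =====

-- B replaces A's per-round list rebuilding ([y_minus] + remaining[2:]) by a single
-- pass per subset that carries the previous endpoint, O(sum k) instead of O(sum k^2).

-- ===== PORT A =====
-- the `while len(remaining) > 3` loop: state (new_universe_size, remaining, new_subsets)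
def pvALoop : Int → List Int → List (List Int) → Int × List (List Int)
  | u, r0 :: r1 :: r2 :: r3 :: rest, acc =>
      pvALoop (u + 2) ((u + 1) :: r2 :: r3 :: rest) (acc ++ [[r0, r1, u], [u, u + 1]])
  | u, r, acc => (u, acc ++ [r])
termination_by _ r _ => r.length

def normalize_subsets (universe_size : Int) (subsets : List (List Int)) : Int × List (List Int) :=
  subsets.foldl
    (fun (st : Int × List (List Int)) subset =>
      if subset.length ≤ 3 then (st.1, st.2 ++ [subset])
      else pvALoop st.1 subset st.2)
    (universe_size, [])

-- ===== PORT B =====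
-- the `for x in subset[1:-2]` loop of Source B: state ((u, prev), out)
def pvBSplit (u : Int) (subset : List Int) (acc : List (List Int)) : Int × List (List Int) :=
  let st :=
    (PySem.List.slice subset (some 1) (some (-2))).foldl
      (fun (q : (Int × Int) × List (List Int)) x =>
        ((q.1.1 + 2, q.1.1 + 1), q.2 ++ [[q.1.2, x, q.1.1], [q.1.1, q.1.1 + 1]]))
      ((u, PySem.List.pyGetD subset 0 0), acc)
  (st.1.1, st.2 ++ [st.1.2 :: PySem.List.slice subset (some (-2)) none])

def normalize_subsets_alt (universe_size : Int) (subsets : List (List Int)) : Int × List (List Int) :=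
  subsets.foldl
    (fun (st : Int × List (List Int)) subset =>
      if subset.length ≤ 3 then (st.1, st.2 ++ [subset])
      else pvBSplit st.1 subset st.2)
    (universe_size, [])

-- ===== PRECONDITION & SPEC =====
def Spec_normalize_subsets (universe_size : Int) (subsets : List (List Int)) (out : Int × List (List Int)) : Prop := out = normalize_subsets_alt universe_size subsets
instance (universe_size : Int) (subsets : List (List Int)) (out : Int × List (List Int)) : Decidable (Spec_normalize_subsets universe_size subsets out) := by unfold Spec_normalize_subsets; infer_instance

-- ===== CLAIM (what is proved, stated in full; the proofs are below) =====
def Claim_equal_normalize_subsets : Prop := ∀ (universe_size : Int) (subsets : List (List Int)), Dom_normalize_subsets universe_size subsets → Spec_normalize_subsets universe_size subsets (normalize_subsets universe_size subsets)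

-- ===== LEMMAS AND PROOFS =====

-- common shape of both split loops: consume `mid` carrying (u, prev), close with `prev :: last2`
def pvChain : Int → Int → List Int → List Int → List (List Int) → Int × List (List Int)
  | u, prev, [], last2, acc => (u, acc ++ [prev :: last2])
  | u, prev, x :: m, last2, acc =>
      pvChain (u + 2) (u + 1) m last2 (acc ++ [[prev, x, u], [u, u + 1]])

lemma pvBSplit_fold_chain (mid : List Int) :
    ∀ (u prev : Int) (last2 : List Int) (acc : List (List Int)),
      (let st := mid.foldl
        (fun (q : (Int × Int) × List (List Int)) x =>
          ((q.1.1 + 2, q.1.1 + 1), q.2 ++ [[q.1.2, x, q.1.1], [q.1.1, q.1.1 + 1]]))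
        ((u, prev), acc)
       (st.1.1, st.2 ++ [st.1.2 :: last2])) = pvChain u prev mid last2 acc := by
  induction mid with
  | nil => intro u prev last2 acc; simp [pvChain]
  | cons x m ih => intro u prev last2 acc; simpa [pvChain] using ih (u + 2) (u + 1) last2 _

lemma slice_mid (xs : List Int) :
    PySem.List.slice xs (some 1) (some (-2)) = xs.tail.take (xs.length - 3) := by
  simp only [PySem.List.slice, PySem.List.clampIdx, Int.reduceNeg, Int.neg_neg_iff_pos,
    Order.lt_two_iff, zero_le_one, reduceIte, add_neg_lt_iff_lt_add, zero_add,
    Nat.cast_le_one, Int.reduceLT, Int.toNat_one]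
  split_ifs with h
  · have h3 : xs.length - 3 = 0 := by omega
    simp [h3]
  · have h2 : ((xs.length : Int) + -2).toNat = xs.length - 2 := by omega
    have h1 : min 1 xs.length = 1 := by omega
    have h3 : xs.length - 2 - 1 = xs.length - 3 := by omega
    rw [h2, h1, List.drop_one, h3]

lemma pvBSplit_eq_chain (u : Int) (subset : List Int) (acc : List (List Int)) :
    pvBSplit u subset acc =
      pvChain u (PySem.List.pyGetD subset 0 0)
        (subset.tail.take (subset.length - 3))
        (subset.drop (subset.length - 2)) acc := by
  rw [pvBSplit, ← slice_mid, ← PySem.List.slice_from_neg_ofNat subset 2 (by omega)]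
  exact pvBSplit_fold_chain _ u _ _ acc

lemma pvALoop_eq_chain :
    ∀ (rest : List Int) (s0 s1 s2 s3 u : Int) (acc : List (List Int)),
      pvALoop u (s0 :: s1 :: s2 :: s3 :: rest) acc =
        pvChain u s0 (s1 :: (s2 :: s3 :: rest).take rest.length)
          ((s2 :: s3 :: rest).drop rest.length) acc := by
  intro rest
  induction rest with
  | nil => intro s0 s1 s2 s3 u acc; simp [pvALoop, pvChain]
  | cons x xs ih =>
      intro s0 s1 s2 s3 u acc
      rw [pvALoop, pvChain]
      rw [ih (u + 1) s2 s3 x]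
      simp [pvChain, List.take_succ_cons, List.drop_succ_cons]

lemma split_eq (u : Int) (subset : List Int) (acc : List (List Int))
    (h : ¬ subset.length ≤ 3) : pvALoop u subset acc = pvBSplit u subset acc := by
  match subset, h with
  | [], h => exact absurd (by simp) h
  | [a], h => exact absurd (by simp) h
  | [a, b], h => exact absurd (by simp) h
  | [a, b, c], h => exact absurd (by simp) h
  | s0 :: s1 :: s2 :: s3 :: rest, h =>
    have hg : PySem.List.pyGetD (s0 :: s1 :: s2 :: s3 :: rest) 0 0 = s0 := by
      simp [pysem]
    have e1 : (s0 :: s1 :: s2 :: s3 :: rest).tail.take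
        ((s0 :: s1 :: s2 :: s3 :: rest).length - 3) = s1 :: (s2 :: s3 :: rest).take rest.length := by
      simp only [List.tail_cons, List.length_cons]
      rw [show rest.length + 1 + 1 + 1 + 1 - 3 = rest.length + 1 by omega, List.take_succ_cons]
    have e2 : (s0 :: s1 :: s2 :: s3 :: rest).drop
        ((s0 :: s1 :: s2 :: s3 :: rest).length - 2) = (s2 :: s3 :: rest).drop rest.length := by
      simp only [List.length_cons]
      rw [show rest.length + 1 + 1 + 1 + 1 - 2 = rest.length + 1 + 1 by omega,
        List.drop_succ_cons, List.drop_succ_cons]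
    rw [pvBSplit_eq_chain, pvALoop_eq_chain, hg, e1, e2]

lemma fold_eq (subsets : List (List Int)) :
    ∀ st : Int × List (List Int),
      subsets.foldl
        (fun (st : Int × List (List Int)) subset =>
          if subset.length ≤ 3 then (st.1, st.2 ++ [subset])
          else pvALoop st.1 subset st.2) st =
      subsets.foldl
        (fun (st : Int × List (List Int)) subset =>
          if subset.length ≤ 3 then (st.1, st.2 ++ [subset])
          else pvBSplit st.1 subset st.2) st := by
  induction subsets with
  | nil => intro st; rfl
  | cons s ss ih =>
      intro st
      simp only [List.foldl_cons]
      by_cases h : s.length ≤ 3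
      · simp only [h, if_pos]; exact ih _
      · simp only [h, if_neg, not_false_iff]; rw [split_eq _ _ _ h]; exact ih _

-- ===== VERDICT (by name: the statement is the Claim_ definition above) =====
theorem normalize_subsets_spec : Claim_equal_normalize_subsets := by
  intro u subsets _
  unfold Spec_normalize_subsets normalize_subsets normalize_subsets_alt
  exact fold_eq subsets (u, [])
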